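-- pv_equiv track=rewrite | github.com/manuel-rdz/tic-tac-chec | evaluator.py | __compareWithBoardsWithNewPiece
-- ===== SOURCE A (Python) =====
-- def __compareWithBoardsWithNewPiece(pieceCode, oldBoard, newBoard):
--     for i in range(4):
--         for j in range(4):
--             if oldBoard[i][j] == 0:
--                 oldBoard[i][j] = pieceCode
--
--                 if oldBoard == newBoard:
--                     return True
--
--                 oldBoard[i][j] = 0
--
--     return False
-- ===== SOURCE B (Python) =====
-- def __compareWithBoardsWithNewPiece(pieceCode, oldBoard, newBoard):
--     empties = {(i, j) for i in range(4) for j in range(4) if oldBoard[i][j] == 0}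
--     edits = [(i, j)
--              for i, (r, s) in enumerate(zip(oldBoard, newBoard))
--              for j, (a, b) in enumerate(zip(r, s))
--              if a != b]
--     if len(edits) != 1:
--         return False
--     i, j = edits[0]
--     if (i, j) not in empties or newBoard[i][j] != pieceCode:
--         return False
--     undone = [row[:] for row in newBoard]
--     undone[i][j] = 0
--     return undone == oldBoard
-- ===== Notes on version B (the rewrite author's own statement) =====
-- stated objective: alternative
-- what changed: Instead of A's trial loop that writes pieceCode into each empty cell in turn and compares the whole boards (up to 16 full-board comparisons, mutating oldBoard), B lists the empty squares of the 4x4 board, finds the positions where the two boards differ in one zipped pass, requires exactly one edit, at an empty square, turning it into pieceCode, and confirms it by undoing that edit on a copy of newBoard and comparing with oldBoard once; …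
-- outside the precondition, e.g. on __compareWithBoardsWithNewPiece(5, [[0]], [[5]]): A returns True, B raises IndexError
import Mathlib
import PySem

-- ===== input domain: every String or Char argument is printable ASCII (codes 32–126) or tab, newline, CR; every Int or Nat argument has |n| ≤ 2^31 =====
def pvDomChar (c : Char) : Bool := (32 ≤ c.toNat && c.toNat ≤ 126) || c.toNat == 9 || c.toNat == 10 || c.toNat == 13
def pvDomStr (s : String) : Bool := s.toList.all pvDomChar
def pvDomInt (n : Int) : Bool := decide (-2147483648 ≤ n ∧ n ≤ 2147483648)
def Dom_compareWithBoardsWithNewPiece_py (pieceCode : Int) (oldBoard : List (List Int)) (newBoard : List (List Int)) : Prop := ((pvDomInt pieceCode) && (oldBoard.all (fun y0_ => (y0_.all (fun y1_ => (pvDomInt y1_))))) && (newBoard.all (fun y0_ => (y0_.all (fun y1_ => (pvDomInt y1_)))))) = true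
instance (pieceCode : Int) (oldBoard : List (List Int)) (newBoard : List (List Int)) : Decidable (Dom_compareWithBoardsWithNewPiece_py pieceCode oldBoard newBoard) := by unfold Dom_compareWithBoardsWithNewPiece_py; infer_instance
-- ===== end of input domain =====

-- B replaces A's place-and-compare loop (write pieceCode into each empty cell, compare whole boards)
-- by one zipped diff pass plus a single undo-and-compare; return-value equivalence only: A leaves
-- oldBoard mutated when it returns True, B never mutates.

-- ===== PORT A =====
-- oldBoard[i][j] = v  (functional rendering of A's in-place assignment; A restores the cell afterwards)
def pvSetCell : List (List Int) → Nat → Nat → Int → List (List Int)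
  | [], _, _, _ => []
  | r :: rs, 0, j, v => r.set j v :: rs
  | r :: rs, i + 1, j, v => r :: pvSetCell rs i j v

-- inner 'for j in range(4)' loop of A; `none` = IndexError in the Python (exact on Pre_, where the cells exist)
def pvAJ (pieceCode : Int) (oldBoard newBoard : List (List Int)) (i : Nat) : List Nat → Bool
  | [] => false
  | j :: js =>
    match oldBoard[i]? with
    | none => false
    | some r =>
      match r[j]? with
      | none => false
      | some v =>
        if v = 0 then
          if pvSetCell oldBoard i j pieceCode = newBoard then true
          else pvAJ pieceCode oldBoard newBoard i js
        else pvAJ pieceCode oldBoard newBoard i js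

-- outer 'for i in range(4)' loop of A
def pvAI (pieceCode : Int) (oldBoard newBoard : List (List Int)) : List Nat → Bool
  | [] => false
  | i :: is =>
    if pvAJ pieceCode oldBoard newBoard i [0, 1, 2, 3] then true
    else pvAI pieceCode oldBoard newBoard is

def compareWithBoardsWithNewPiece_py (pieceCode : Int) (oldBoard : List (List Int)) (newBoard : List (List Int)) : Bool :=
  pvAI pieceCode oldBoard newBoard [0, 1, 2, 3]

-- ===== PORT B =====
-- b[i][j] as an Option (none = IndexError in Python)
def pvCell (b : List (List Int)) (i j : Nat) : Option Int :=
  b[i]?.bind fun r => r[j]?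

-- Source B's set comprehension: the empty squares of the 4x4 board (elements distinct by
-- construction, so the set is this list of distinct pairs; none = IndexError in the Python,
-- exact on Pre_, where the 4x4 region exists)
def pvEmpties (old : List (List Int)) : List (Nat × Nat) :=
  ([0, 1, 2, 3] : List Nat).flatMap fun i =>
    ([0, 1, 2, 3] : List Nat).filterMap fun j =>
      match pvCell old i j with
      | some v => if v = 0 then some (i, j) else none
      | none => none

-- inner comprehension of Source B: positions (i, j) where the zipped rows differ
def pvRowEdits (i : Nat) : Nat → List Int → List Int → List (Nat × Nat)
  | _, [], _ => []
  | _, _ :: _, [] => []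
  | j, a :: r, b :: s => (if a ≠ b then [(i, j)] else []) ++ pvRowEdits i (j + 1) r s

-- outer comprehension of Source B over the zipped boards
def pvEdits : Nat → List (List Int) → List (List Int) → List (Nat × Nat)
  | _, [], _ => []
  | _, _ :: _, [] => []
  | i, r :: old, s :: new => pvRowEdits i 0 r s ++ pvEdits (i + 1) old new

-- undone = copy of newBoard with cell (i, j) cleared to 0
def pvUndo : List (List Int) → Nat → Nat → List (List Int)
  | [], _, _ => []
  | r :: rs, 0, j => r.set j 0 :: rs
  | r :: rs, i + 1, j => r :: pvUndo rs i j

def compareWithBoardsWithNewPiece_py_alt (pieceCode : Int) (oldBoard : List (List Int)) (newBoard : List (List Int)) : Bool :=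
  match pvEdits 0 oldBoard newBoard with
  | [(i, j)] =>
    match pvCell newBoard i j with   -- some: the edit position indexes an existing cell
    | some b =>
      if ¬ (pvEmpties oldBoard).contains (i, j) ∨ b ≠ pieceCode then false
      else decide (pvUndo newBoard i j = oldBoard)
    | none => false
  | _ => false

-- ===== PRECONDITION & SPEC =====
-- Pre_ restricts to the game's natural domain: it excludes 'placing' the empty marker 0 on an
-- unchanged board (there A's True for a board with an empty cell is an artefact of writing the
-- marker that means empty) and oldBoards lacking the full 4x4 region A scans (outside it both
-- Pythons in general raise IndexError; A returns early only when a matching placement precedes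
-- the missing cell, where B still raises).
def Pre_compareWithBoardsWithNewPiece_py (pieceCode : Int) (oldBoard : List (List Int)) (newBoard : List (List Int)) : Prop :=
  (pieceCode ≠ 0 ∨ oldBoard ≠ newBoard) ∧ 4 ≤ oldBoard.length ∧ ∀ r ∈ oldBoard.take 4, 4 ≤ r.length

instance (pieceCode : Int) (oldBoard : List (List Int)) (newBoard : List (List Int)) : Decidable (Pre_compareWithBoardsWithNewPiece_py pieceCode oldBoard newBoard) := by
  unfold Pre_compareWithBoardsWithNewPiece_py; infer_instance

def pvWitness_compareWithBoardsWithNewPiece_py : Int × List (List Int) × List (List Int) :=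
  (1, [[0,0,0,0],[0,0,0,0],[0,0,0,0],[0,0,0,0]], [[1,0,0,0],[0,0,0,0],[0,0,0,0],[0,0,0,0]])

def Spec_compareWithBoardsWithNewPiece_py (pieceCode : Int) (oldBoard : List (List Int)) (newBoard : List (List Int)) (out : Bool) : Prop := out = compareWithBoardsWithNewPiece_py_alt pieceCode oldBoard newBoard
instance (pieceCode : Int) (oldBoard : List (List Int)) (newBoard : List (List Int)) (out : Bool) : Decidable (Spec_compareWithBoardsWithNewPiece_py pieceCode oldBoard newBoard out) := by unfold Spec_compareWithBoardsWithNewPiece_py; infer_instance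

-- ===== CLAIM (what is proved, stated in full; the proofs are below) =====
def Claim_equal_compareWithBoardsWithNewPiece_py : Prop := ∀ (pieceCode : Int) (oldBoard : List (List Int)) (newBoard : List (List Int)), Dom_compareWithBoardsWithNewPiece_py pieceCode oldBoard newBoard → Pre_compareWithBoardsWithNewPiece_py pieceCode oldBoard newBoard → Spec_compareWithBoardsWithNewPiece_py pieceCode oldBoard newBoard (compareWithBoardsWithNewPiece_py pieceCode oldBoard newBoard)

-- ===== LEMMAS AND PROOFS =====

-- the common characterisation both ports are reduced to
def pvQ (pieceCode : Int) (oldBoard newBoard : List (List Int)) : Prop :=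
  ∃ i j : Nat, i < 4 ∧ j < 4 ∧
    (∃ r, oldBoard[i]? = some r ∧ r[j]? = some 0) ∧
    pvSetCell oldBoard i j pieceCode = newBoard

theorem pv_mem0123 (x : Nat) : x ∈ ([0, 1, 2, 3] : List Nat) ↔ x < 4 := by
  simp; omega

theorem pvAJ_true_iff (pc : Int) (old new : List (List Int)) (i : Nat) (r : List Int)
    (hr : old[i]? = some r) (js : List Nat) (hpw : js.Pairwise (· < ·)) :
    pvAJ pc old new i js = true ↔
      ∃ j ∈ js, r[j]? = some 0 ∧ pvSetCell old i j pc = new := by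
  induction js with
  | nil => simp [pvAJ]
  | cons j js ih =>
    obtain ⟨hlt, hpw'⟩ := List.pairwise_cons.mp hpw
    have ih' := ih hpw'
    cases hv : r[j]? with
    | none =>
      simp only [pvAJ, hr, hv]
      constructor
      · intro h; exact absurd h (by simp)
      · rintro ⟨x, hx, h0, _⟩
        rcases List.mem_cons.mp hx with rfl | hx
        · rw [hv] at h0; cases h0
        · have hjlen : r.length ≤ j := by simpa using List.getElem?_eq_none_iff.mp hv
          have hxr : x < r.length := (List.getElem?_eq_some_iff.mp h0).1
          have := hlt x hx
          omega
    | some v =>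
      simp only [pvAJ, hr, hv]
      by_cases hv0 : v = 0
      · subst hv0
        rw [if_pos rfl]
        by_cases hset : pvSetCell old i j pc = new
        · rw [if_pos hset]
          exact iff_of_true rfl ⟨j, by simp, hv, hset⟩
        · rw [if_neg hset, ih']
          constructor
          · rintro ⟨x, hx, h1, h2⟩; exact ⟨x, by simp [hx], h1, h2⟩
          · rintro ⟨x, hx, h1, h2⟩
            rcases List.mem_cons.mp hx with rfl | hx
            · exact absurd h2 hset
            · exact ⟨x, hx, h1, h2⟩
      · rw [if_neg hv0, ih']
        constructor
        · rintro ⟨x, hx, h1, h2⟩; exact ⟨x, by simp [hx], h1, h2⟩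
        · rintro ⟨x, hx, h1, h2⟩
          rcases List.mem_cons.mp hx with rfl | hx
          · rw [hv] at h1; exact absurd (Option.some.inj h1) hv0
          · exact ⟨x, hx, h1, h2⟩

theorem pvAJ_none (pc : Int) (old new : List (List Int)) (i : Nat)
    (hr : old[i]? = none) (js : List Nat) : pvAJ pc old new i js = false := by
  cases js with
  | nil => rfl
  | cons j js => simp [pvAJ, hr]

theorem pvAI_true_iff (pc : Int) (old new : List (List Int)) (is : List Nat) :
    pvAI pc old new is = true ↔
      ∃ i ∈ is, ∃ r, old[i]? = some r ∧ ∃ j, j < 4 ∧ r[j]? = some 0 ∧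
        pvSetCell old i j pc = new := by
  induction is with
  | nil => simp [pvAI]
  | cons i is ih =>
    simp only [pvAI]
    cases ho : old[i]? with
    | none =>
      rw [pvAJ_none pc old new i ho, if_neg (by simp), ih]
      constructor
      · rintro ⟨x, hx, rest⟩; exact ⟨x, by simp [hx], rest⟩
      · rintro ⟨x, hx, r, hr, rest⟩
        rcases List.mem_cons.mp hx with rfl | hx
        · rw [ho] at hr; cases hr
        · exact ⟨x, hx, r, hr, rest⟩
    | some r =>
      have hAJ := pvAJ_true_iff pc old new i r ho [0, 1, 2, 3] (by decide)
      by_cases hcur : pvAJ pc old new i [0, 1, 2, 3] = true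
      · rw [if_pos hcur]
        obtain ⟨j, hj, h0, hset⟩ := hAJ.mp hcur
        exact iff_of_true rfl ⟨i, by simp, r, ho, j, (pv_mem0123 j).mp hj, h0, hset⟩
      · rw [if_neg hcur, ih]
        constructor
        · rintro ⟨x, hx, rest⟩; exact ⟨x, by simp [hx], rest⟩
        · rintro ⟨x, hx, r', hr', j, hj, h0, hset⟩
          rcases List.mem_cons.mp hx with rfl | hx
          · rw [ho] at hr'; cases Option.some.inj hr'
            exact absurd (hAJ.mpr ⟨j, (pv_mem0123 j).mpr hj, h0, hset⟩) hcur
          · exact ⟨x, hx, r', hr', j, hj, h0, hset⟩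

theorem pvA_true_iff (pc : Int) (old new : List (List Int)) :
    compareWithBoardsWithNewPiece_py pc old new = true ↔ pvQ pc old new := by
  rw [compareWithBoardsWithNewPiece_py, pvAI_true_iff pc old new]
  constructor
  · rintro ⟨i, hi, r, hr, j, hj, h0, hset⟩
    exact ⟨i, j, (pv_mem0123 i).mp hi, hj, ⟨r, hr, h0⟩, hset⟩
  · rintro ⟨i, j, hi, hj, ⟨r, hr, h0⟩, hset⟩
    exact ⟨i, (pv_mem0123 i).mpr hi, r, hr, j, hj, h0, hset⟩

-- ---- lemmas for port B ----

theorem pvUndo_eq_setCell (b : List (List Int)) : ∀ i j, pvUndo b i j = pvSetCell b i j 0 := by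
  induction b with
  | nil => intro i j; rfl
  | cons r rs ih =>
    intro i j
    cases i with
    | zero => rfl
    | succ i => simp [pvUndo, pvSetCell, ih]

theorem pvSetCell_setCell (b : List (List Int)) : ∀ i j (v w : Int),
    pvSetCell (pvSetCell b i j v) i j w = pvSetCell b i j w := by
  induction b with
  | nil => intro i j v w; rfl
  | cons r rs ih =>
    intro i j v w
    cases i with
    | zero => simp [pvSetCell, List.set_set]
    | succ i => simp [pvSetCell, ih]

theorem pvSet_self (r : List Int) : ∀ j (v : Int), r[j]? = some v → r.set j v = r := by
  induction r with
  | nil => intro j v h; simp at h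
  | cons a r ih =>
    intro j v h
    cases j with
    | zero => simp at h; simp [h]
    | succ j => simp at h ⊢; exact ih j v h

theorem pvSetCell_self (old : List (List Int)) : ∀ i j (v : Int) r,
    old[i]? = some r → r[j]? = some v → pvSetCell old i j v = old := by
  induction old with
  | nil => intro i j v r h; simp at h
  | cons q old ih =>
    intro i j v r h hv
    cases i with
    | zero =>
      simp at h; subst h
      simp [pvSetCell, pvSet_self q j v hv]
    | succ i =>
      simp at h
      simp [pvSetCell, ih i j v r h hv]

theorem pvSetCell_getElem? (b : List (List Int)) : ∀ i i' j (v : Int),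
    (pvSetCell b i j v)[i']? = if i' = i then (b[i]?).map (·.set j v) else b[i']? := by
  induction b with
  | nil =>
    intro i i' j v
    simp [pvSetCell]
  | cons r t ih =>
    intro i i' j v
    cases i with
    | zero =>
      cases i' with
      | zero => simp [pvSetCell]
      | succ i' => simp [pvSetCell]
    | succ i =>
      cases i' with
      | zero => simp [pvSetCell]
      | succ i' => simpa [pvSetCell] using ih i i' j v

theorem pvCell_setCell (b : List (List Int)) (i j i' j' : Nat) (v : Int) (r : List Int)
    (hr : b[i]? = some r) (hjr : j < r.length) :
    pvCell (pvSetCell b i j v) i' j' =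
      if i' = i ∧ j' = j then some v else pvCell b i' j' := by
  unfold pvCell
  rw [pvSetCell_getElem?]
  by_cases hi : i' = i
  · subst hi
    rw [if_pos rfl, hr]
    simp only [Option.map_some, Option.bind_some]
    rw [List.getElem?_set]
    by_cases hj : j = j'
    · subst hj
      simp [hjr]
    · rw [if_neg hj, if_neg (fun hc => hj (Eq.symm hc.2))]
  · rw [if_neg hi, if_neg (by tauto)]

theorem pvCell_some (b : List (List Int)) (i j : Nat) (v : Int)
    (h : pvCell b i j = some v) : ∃ r, b[i]? = some r ∧ r[j]? = some v := by
  unfold pvCell at h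
  cases hb : b[i]? with
  | none => rw [hb] at h; cases h
  | some r => rw [hb] at h; exact ⟨r, rfl, by simpa using h⟩

theorem pvEmpties_mem (old : List (List Int)) (i j : Nat) :
    (i, j) ∈ pvEmpties old ↔ i < 4 ∧ j < 4 ∧ pvCell old i j = some 0 := by
  simp only [pvEmpties, List.mem_flatMap, List.mem_filterMap]
  constructor
  · rintro ⟨i', hi', j', hj', h⟩
    cases hc : pvCell old i' j' with
    | none => rw [hc] at h; cases h
    | some v =>
      rw [hc] at h
      dsimp only [] at h
      by_cases hv0 : v = 0
      · rw [if_pos hv0] at h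
        obtain ⟨rfl, rfl⟩ := Prod.mk.injEq .. ▸ Option.some.inj h
        exact ⟨(pv_mem0123 i').mp hi', (pv_mem0123 j').mp hj', by rw [hc, hv0]⟩
      · rw [if_neg hv0] at h; cases h
  · rintro ⟨hi, hj, h0⟩
    refine ⟨i, (pv_mem0123 i).mpr hi, j, (pv_mem0123 j).mpr hj, ?_⟩
    rw [h0]
    simp

theorem pvRowEdits_self (r : List Int) : ∀ i j, pvRowEdits i j r r = [] := by
  induction r with
  | nil => intro i j; rfl
  | cons a r ih => intro i j; simp [pvRowEdits, ih]

theorem pvEdits_self (old : List (List Int)) : ∀ i, pvEdits i old old = [] := by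
  induction old with
  | nil => intro i; rfl
  | cons r old ih => intro i; simp [pvEdits, pvRowEdits_self, ih]

theorem pvRowEdits_set (r : List Int) : ∀ j0 j i (a v : Int),
    r[j0]? = some a → a ≠ v →
    pvRowEdits i j r (r.set j0 v) = [(i, j + j0)] := by
  induction r with
  | nil => intro j0 j i a v h; simp at h
  | cons x r ih =>
    intro j0 j i a v h hne
    cases j0 with
    | zero =>
      simp at h; subst h
      simp [List.set, pvRowEdits, hne, pvRowEdits_self]
    | succ j0 =>
      simp at h
      have := ih j0 (j + 1) i a v h hne
      simp [List.set, pvRowEdits, this]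
      omega

theorem pvEdits_set (old : List (List Int)) : ∀ i0 i j0 (v a : Int) r,
    old[i0]? = some r → r[j0]? = some a → a ≠ v →
    pvEdits i old (pvSetCell old i0 j0 v) = [(i + i0, j0)] := by
  induction old with
  | nil => intro i0 i j0 v a r h; simp at h
  | cons q old ih =>
    intro i0 i j0 v a r h hj hne
    cases i0 with
    | zero =>
      simp at h; subst h
      simp only [pvSetCell, pvEdits, pvEdits_self, List.append_nil, Nat.add_zero]
      simpa using pvRowEdits_set q j0 0 i a v hj hne
    | succ i0 =>
      simp at h
      have := ih i0 (i + 1) j0 v a r h hj hne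
      simp only [pvSetCell, pvEdits, pvRowEdits_self, List.nil_append, this]
      rw [show i + 1 + i0 = i + (i0 + 1) from by omega]

theorem pvB_true_iff (pc : Int) (old new : List (List Int)) (hpc : pc ≠ 0 ∨ old ≠ new) :
    compareWithBoardsWithNewPiece_py_alt pc old new = true ↔ pvQ pc old new := by
  unfold compareWithBoardsWithNewPiece_py_alt
  constructor
  · intro h
    rcases he : pvEdits 0 old new with _ | ⟨⟨i, j⟩, rest⟩
    · rw [he] at h; simp at h
    · rcases rest with _ | ⟨y, ys⟩
      · rw [he] at h
        dsimp only [] at h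
        cases hb : pvCell new i j with
        | none => rw [hb] at h; cases h
        | some b =>
          rw [hb] at h
          dsimp only [] at h
          by_cases hcond : ¬ (pvEmpties old).contains (i, j) ∨ b ≠ pc
          · rw [if_pos hcond] at h; cases h
          · rw [if_neg hcond] at h
            push Not at hcond
            obtain ⟨hcont, hbpc⟩ := hcond
            have hmem : (i, j) ∈ pvEmpties old := by simpa using hcont
            obtain ⟨hi, hj, hcold⟩ := (pvEmpties_mem old i j).mp hmem
            rw [hbpc] at hb
            have hund : pvUndo new i j = old := by simpa using h
            obtain ⟨s, hs, hsj⟩ := pvCell_some new i j pc hb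
            have hjs : j < s.length := (List.getElem?_eq_some_iff.mp hsj).1
            have hold : old = pvSetCell new i j 0 := by
              rw [← hund, pvUndo_eq_setCell]
            refine ⟨i, j, hi, hj, pvCell_some old i j 0 hcold, ?_⟩
            rw [hold, pvSetCell_setCell]
            exact pvSetCell_self new i j pc s hs hsj
      · rw [he] at h; cases h
  · rintro ⟨i, j, hi, hj, ⟨r, hr, hrj⟩, hset⟩
    have hpc' : pc ≠ 0 := by
      rcases hpc with hpc | hne
      · exact hpc
      · intro hpc0
        apply hne
        rw [← hset, hpc0]
        exact (pvSetCell_self old i j 0 r hr hrj).symm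
    have he : pvEdits 0 old new = [(i, j)] := by
      rw [← hset]
      simpa using pvEdits_set old i 0 j pc 0 r hr hrj (Ne.symm hpc')
    have hjr : j < r.length := (List.getElem?_eq_some_iff.mp hrj).1
    have hcold : pvCell old i j = some 0 := by
      unfold pvCell; rw [hr]; simpa using hrj
    have hcnew : pvCell new i j = some pc := by
      rw [← hset, pvCell_setCell old i j i j pc r hr hjr, if_pos ⟨rfl, rfl⟩]
    have hmem : (i, j) ∈ pvEmpties old := (pvEmpties_mem old i j).mpr ⟨hi, hj, hcold⟩
    rw [he]
    dsimp only []
    rw [hcnew]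
    dsimp only []
    rw [if_neg (by simp [hmem])]
    simp only [decide_eq_true_eq]
    rw [pvUndo_eq_setCell, ← hset, pvSetCell_setCell]
    exact pvSetCell_self old i j 0 r hr hrj

-- ===== VERDICT (by name: the statement is the Claim_ definition above) =====
theorem compareWithBoardsWithNewPiece_py_spec : Claim_equal_compareWithBoardsWithNewPiece_py := by
  intro pc old new _ hpre
  unfold Spec_compareWithBoardsWithNewPiece_py
  have hA := pvA_true_iff pc old new
  have hB := pvB_true_iff pc old new hpre.1
  by_cases hq : pvQ pc old new
  · rw [hA.mpr hq, hB.mpr hq]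
  · have h1 : compareWithBoardsWithNewPiece_py pc old new = false := by
      cases hAv : compareWithBoardsWithNewPiece_py pc old new
      · rfl
      · exact absurd (hA.mp hAv) hq
    have h2 : compareWithBoardsWithNewPiece_py_alt pc old new = false := by
      cases hBv : compareWithBoardsWithNewPiece_py_alt pc old new
      · rfl
      · exact absurd (hB.mp hBv) hq
    rw [h1, h2]
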